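-- pv_equiv track=rewrite | github.com/SPMIC-UoN/cmore_pipeline | generate_idps.py | strip_repeats
-- ===== SOURCE A (Python) =====
-- def strip_repeats(col_names):
--     new_col_names = []
--     for idx, col_name in enumerate(col_names):
--         if idx > 0 and col_names[idx-1] == col_name:
--             new_col_names.append("")
--         else:
--             new_col_names.append(col_name)
--     return new_col_names
-- ===== SOURCE B (Python) =====
-- def strip_repeats(col_names):
--     # Run-grouping pass: split into maximal runs of equal consecutive values,
--     # keep the first name of each run and blank out the rest.
--     out = []
--     i = 0
--     n = len(col_names)
--     while i < n:
--         j = i + 1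
--         while j < n and col_names[j] == col_names[i]:
--             j += 1
--         out.append(col_names[i])
--         out.extend([""] * (j - i - 1))
--         i = j
--     return out
-- ===== Notes on version B (the rewrite author's own statement) =====
-- stated objective: alternative
-- what changed: Replaces the per-index comparison with the predecessor (enumerate + col_names[idx-1]) by a run-grouping pass that finds each maximal run of equal consecutive names, emits its first name once and a blank for each remaining element.
import Mathlib
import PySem

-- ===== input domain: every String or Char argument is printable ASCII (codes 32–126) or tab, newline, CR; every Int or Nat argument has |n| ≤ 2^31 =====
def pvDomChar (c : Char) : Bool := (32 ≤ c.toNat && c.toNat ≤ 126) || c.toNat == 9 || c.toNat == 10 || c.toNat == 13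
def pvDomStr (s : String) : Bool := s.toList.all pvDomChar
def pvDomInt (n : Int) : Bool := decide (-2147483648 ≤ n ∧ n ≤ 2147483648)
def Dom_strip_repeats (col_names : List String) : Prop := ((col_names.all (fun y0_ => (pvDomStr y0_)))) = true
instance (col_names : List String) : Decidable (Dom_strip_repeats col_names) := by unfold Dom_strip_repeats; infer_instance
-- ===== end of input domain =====

-- B replaces A's index/predecessor comparison by a run-grouping pass (alternative decomposition, same cost).


-- ===== PORT A =====
def strip_repeats (col_names : List String) : List String :=
  (PySem.List.enumerate col_names).foldl
    (fun new_col_names p =>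
      if p.1 > 0 ∧ PySem.List.pyGet? col_names (p.1 - 1) = some p.2 then
        new_col_names ++ [""]
      else
        new_col_names ++ [p.2])
    []

-- ===== PORT B =====
-- inner while loop of Source B: consume the run of elements equal to x,
-- returning (number consumed, remaining list)
def pvTakeRun (x : String) : List String → Nat × List String
  | [] => (0, [])
  | y :: ys => if y = x then ((pvTakeRun x ys).1 + 1, (pvTakeRun x ys).2) else (0, y :: ys)

theorem pvTakeRun_length (x : String) : ∀ l : List String, (pvTakeRun x l).2.length ≤ l.length
  | [] => by simp [pvTakeRun]
  | y :: ys => by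
    by_cases h : y = x
    · simpa [pvTakeRun, h] using Nat.le_succ_of_le (pvTakeRun_length x ys)
    · simp [pvTakeRun, h]

-- outer while loop of Source B: emit run head, blanks for the rest of the run, continue
def strip_repeats_alt : List String → List String
  | [] => []
  | x :: xs =>
    x :: (List.replicate (pvTakeRun x xs).1 "" ++ strip_repeats_alt (pvTakeRun x xs).2)
termination_by l => l.length
decreasing_by
  exact Nat.lt_succ_of_le (pvTakeRun_length x xs)

-- ===== PRECONDITION & SPEC =====
def Spec_strip_repeats (col_names : List String) (out : List String) : Prop := out = strip_repeats_alt col_names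
instance (col_names : List String) (out : List String) : Decidable (Spec_strip_repeats col_names out) := by unfold Spec_strip_repeats; infer_instance

-- ===== CLAIM (what is proved, stated in full; the proofs are below) =====
def Claim_equal_strip_repeats : Prop := ∀ (col_names : List String), Dom_strip_repeats col_names → Spec_strip_repeats col_names (strip_repeats col_names)

-- ===== LEMMAS AND PROOFS =====

-- reference function: previous element carried along, head blanked iff it equals prev
def pvSpec : Option String → List String → List String
  | _, [] => []
  | prev, x :: xs => (if prev = some x then "" else x) :: pvSpec (some x) xs

theorem pvSpec_getElem? (l : List String) : ∀ (prev : Option String) (k : Nat),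
    (pvSpec prev l)[k]? =
      if k = 0 then l[0]?.map (fun x => if prev = some x then "" else x)
      else l[k]?.map (fun x => if l[k-1]? = some x then "" else x) := by
  induction l with
  | nil => intro prev k; cases k <;> simp [pvSpec]
  | cons x xs ih =>
    intro prev k
    match k with
    | 0 => simp [pvSpec]
    | Nat.succ j =>
      have := ih (some x) j
      cases j with
      | zero => simpa [pvSpec] using this
      | succ i => simpa [pvSpec] using this

-- B equals the reference function
theorem takeRun_spec (x : String) (l : List String) :
    pvSpec (some x) l =
      List.replicate (pvTakeRun x l).1 "" ++ pvSpec none (pvTakeRun x l).2 := by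
  induction l with
  | nil => simp [pvSpec, pvTakeRun]
  | cons y ys ih =>
    by_cases h : y = x
    · subst h
      simp [pvSpec, pvTakeRun, ih, List.replicate_succ]
    · have h' : ¬ (some x = some y) := by simpa using fun e => h e.symm
      simp [pvSpec, pvTakeRun, h, h']

theorem alt_eq_pvSpec : ∀ l : List String, strip_repeats_alt l = pvSpec none l
  | [] => by simp [strip_repeats_alt, pvSpec]
  | x :: xs => by
    have hrec := alt_eq_pvSpec (pvTakeRun x xs).2
    rw [strip_repeats_alt, pvSpec, hrec, ← takeRun_spec]
    simp
termination_by l => l.length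
decreasing_by
  exact Nat.lt_succ_of_le (pvTakeRun_length x xs)

-- A as a map over the enumeration
theorem a_eq_map (l : List String) :
    strip_repeats l =
      (PySem.List.enumerate l).map
        (fun p => if p.1 > 0 ∧ PySem.List.pyGet? l (p.1 - 1) = some p.2 then "" else p.2) := by
  unfold strip_repeats
  have : (fun (acc : List String) (p : Int × String) =>
      if p.1 > 0 ∧ PySem.List.pyGet? l (p.1 - 1) = some p.2 then acc ++ [""] else acc ++ [p.2])
      = fun acc p => acc ++ [if p.1 > 0 ∧ PySem.List.pyGet? l (p.1 - 1) = some p.2 then "" else p.2] := by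
    funext acc p; split <;> rfl
  rw [this, PySem.List.foldl_append_singleton_eq_map]
  simp

theorem a_eq_pvSpec (l : List String) : strip_repeats l = pvSpec none l := by
  rw [a_eq_map]
  apply List.ext_getElem?
  intro k
  rw [pvSpec_getElem?, List.getElem?_map, PySem.List.getElem?_enumerate]
  cases hk : l[k]? with
  | none =>
    have hl : l.length ≤ k := List.getElem?_eq_none_iff.mp hk
    cases k with
    | zero =>
      have : l = [] := List.length_eq_zero_iff.mp (Nat.le_zero.mp hl)
      subst this; simp
    | succ j => simp
  | some x =>
    cases k with
    | zero => simp [hk]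
    | succ j =>
      simp only [Option.map_some]
      simp [PySem.List.pyGet?_natCast]

-- ===== VERDICT (by name: the statement is the Claim_ definition above) =====
theorem strip_repeats_spec : Claim_equal_strip_repeats := by
  intro l _
  unfold Spec_strip_repeats
  rw [a_eq_pvSpec, alt_eq_pvSpec]
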